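-- pv_equiv track=rewrite | github.com/Fergonz1993/financenews | src/financial_news/intelligence/news_nlp_engine.py | _generate_topic_description
-- ===== SOURCE A (Python) =====
-- def _generate_topic_description(keywords: list[str]) -> str:
--     """Generate human-readable topic description."""
--     if not keywords:
--         return "General financial news"
--
--     # Create description based on keywords
--     primary_keywords = keywords[:3]
--
--     if any(word in primary_keywords for word in ["earnings", "revenue", "profit"]):
--         return "Earnings and Financial Performance"
--     elif any(
--         word in primary_keywords for word in ["merger", "acquisition", "deal"]
--     ):
--         return "Mergers and Acquisitions"
--     elif any(
--         word in primary_keywords for word in ["ceo", "management", "leadership"]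
--     ):
--         return "Corporate Leadership and Management"
--     elif any(
--         word in primary_keywords for word in ["regulatory", "sec", "compliance"]
--     ):
--         return "Regulatory and Compliance"
--     elif any(
--         word in primary_keywords for word in ["technology", "innovation", "digital"]
--     ):
--         return "Technology and Innovation"
--     else:
--         return f"Financial News - {', '.join(primary_keywords[:2])}"
-- ===== SOURCE B (Python) =====
-- # Inverted index: keyword -> (rule priority, description); the answer is the
-- # minimum-priority hit among the first three keywords (recursive min-selection),
-- # instead of testing rule groups one after another.
-- _KEYWORD_INDEX = {
--     "earnings": (0, "Earnings and Financial Performance"),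
--     "revenue": (0, "Earnings and Financial Performance"),
--     "profit": (0, "Earnings and Financial Performance"),
--     "merger": (1, "Mergers and Acquisitions"),
--     "acquisition": (1, "Mergers and Acquisitions"),
--     "deal": (1, "Mergers and Acquisitions"),
--     "ceo": (2, "Corporate Leadership and Management"),
--     "management": (2, "Corporate Leadership and Management"),
--     "leadership": (2, "Corporate Leadership and Management"),
--     "regulatory": (3, "Regulatory and Compliance"),
--     "sec": (3, "Regulatory and Compliance"),
--     "compliance": (3, "Regulatory and Compliance"),
--     "technology": (4, "Technology and Innovation"),
--     "innovation": (4, "Technology and Innovation"),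
--     "digital": (4, "Technology and Innovation"),
-- }
--
--
-- def _best_hit(words):
--     """Lowest-priority (priority, description) hit among words, or None."""
--     if not words:
--         return None
--     rest = _best_hit(words[1:])
--     hit = _KEYWORD_INDEX.get(words[0])
--     if hit is None:
--         return rest
--     if rest is None or hit[0] <= rest[0]:
--         return hit
--     return rest
--
--
-- def _generate_topic_description(keywords: list[str]) -> str:
--     """Generate human-readable topic description."""
--     if not keywords:
--         return "General financial news"
--
--     primary_keywords = keywords[:3]
--     hit = _best_hit(primary_keywords)
--     if hit is not None:
--         return hit[1]
--     return f"Financial News - {', '.join(primary_keywords[:2])}"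
-- ===== Notes on version B (the rewrite author's own statement) =====
-- stated objective: alternative
-- what changed: Replaces the five sequential group-membership branches with an inverted keyword->(priority,description) index: B scans the (up to three) primary keywords once, looks each up in the index and keeps the minimum-priority hit, instead of testing each rule's word group against the keyword list.
import Mathlib
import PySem

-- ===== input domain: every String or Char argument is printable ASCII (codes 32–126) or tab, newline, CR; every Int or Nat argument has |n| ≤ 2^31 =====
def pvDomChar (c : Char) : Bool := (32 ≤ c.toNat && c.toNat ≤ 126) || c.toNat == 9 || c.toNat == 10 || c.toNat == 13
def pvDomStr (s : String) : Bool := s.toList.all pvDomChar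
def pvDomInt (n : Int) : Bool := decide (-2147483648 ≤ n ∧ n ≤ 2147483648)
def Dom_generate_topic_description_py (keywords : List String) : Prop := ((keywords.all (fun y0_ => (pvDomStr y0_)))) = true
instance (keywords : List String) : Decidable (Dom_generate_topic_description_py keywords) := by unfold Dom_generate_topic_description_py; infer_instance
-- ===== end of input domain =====

-- B replaces A's five sequential group-membership branches by an inverted keyword->(priority, description)
-- index scanned once over the primary keywords, keeping the minimum-priority hit (objective: alternative).


-- ===== PORT A =====
-- Port of A: literal if/elif chain over fixed keyword groups.
def generate_topic_description_py (keywords : List String) : String :=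
  if keywords = [] then "General financial news"
  else
    let primary_keywords := PySem.List.slice keywords none (some 3)
    if (["earnings", "revenue", "profit"].any (fun word => primary_keywords.contains word)) then
      "Earnings and Financial Performance"
    else if (["merger", "acquisition", "deal"].any (fun word => primary_keywords.contains word)) then
      "Mergers and Acquisitions"
    else if (["ceo", "management", "leadership"].any (fun word => primary_keywords.contains word)) then
      "Corporate Leadership and Management"
    else if (["regulatory", "sec", "compliance"].any (fun word => primary_keywords.contains word)) then
      "Regulatory and Compliance"
    else if (["technology", "innovation", "digital"].any (fun word => primary_keywords.contains word)) then
      "Technology and Innovation"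
    else
      "Financial News - " ++ PySem.Str.join ", " (PySem.List.slice primary_keywords none (some 2))

-- ===== PORT B =====
-- Port of B: inverted index keyword -> (priority, description); recursive minimum-priority selection.
def pvKeywordIndex : PySem.Dict String (Int × String) := PySem.Dict.ofList
  [ ("earnings", (0, "Earnings and Financial Performance")),
    ("revenue", (0, "Earnings and Financial Performance")),
    ("profit", (0, "Earnings and Financial Performance")),
    ("merger", (1, "Mergers and Acquisitions")),
    ("acquisition", (1, "Mergers and Acquisitions")),
    ("deal", (1, "Mergers and Acquisitions")),
    ("ceo", (2, "Corporate Leadership and Management")),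
    ("management", (2, "Corporate Leadership and Management")),
    ("leadership", (2, "Corporate Leadership and Management")),
    ("regulatory", (3, "Regulatory and Compliance")),
    ("sec", (3, "Regulatory and Compliance")),
    ("compliance", (3, "Regulatory and Compliance")),
    ("technology", (4, "Technology and Innovation")),
    ("innovation", (4, "Technology and Innovation")),
    ("digital", (4, "Technology and Innovation")) ]

def pvBestHit : List String → Option (Int × String)
  | [] => none
  | w :: ws =>
    let rest := pvBestHit ws
    match pvKeywordIndex.get? w with
    | none => rest
    | some hit =>
      match rest with
      | none => some hit
      | some r => if hit.1 ≤ r.1 then some hit else r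

def generate_topic_description_py_alt (keywords : List String) : String :=
  if keywords = [] then "General financial news"
  else
    let primary_keywords := PySem.List.slice keywords none (some 3)
    match pvBestHit primary_keywords with
    | some hit => hit.2
    | none => "Financial News - " ++ PySem.Str.join ", " (PySem.List.slice primary_keywords none (some 2))

-- ===== PRECONDITION & SPEC =====
def Spec_generate_topic_description_py (keywords : List String) (out : String) : Prop := out = generate_topic_description_py_alt keywords
instance (keywords : List String) (out : String) : Decidable (Spec_generate_topic_description_py keywords out) := by unfold Spec_generate_topic_description_py; infer_instance

-- ===== CLAIM (what is proved, stated in full; the proofs are below) =====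
def Claim_equal_generate_topic_description_py : Prop := ∀ (keywords : List String), Dom_generate_topic_description_py keywords → Spec_generate_topic_description_py keywords (generate_topic_description_py keywords)

-- ===== LEMMAS AND PROOFS =====

-- A's "any group word in xs" test, re-read as a scan over xs.
lemma pv_tri_any (a b c : String) (xs : List String) :
    ([a, b, c].any (fun g => xs.contains g))
      = xs.any (fun w => w == a || w == b || w == c) := by
  rw [Bool.eq_iff_iff]
  simp only [List.any_cons, List.any_nil, Bool.or_eq_true, Bool.or_false,
    List.contains_eq_mem, decide_eq_true_eq, List.any_eq_true, beq_iff_eq]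
  aesop

-- pvBestHit computes the first-matching-rule chain.
lemma pvBestHit_eq (xs : List String) :
    pvBestHit xs =
      if xs.any (fun w => w == "earnings" || w == "revenue" || w == "profit") then
        some ((0 : Int), "Earnings and Financial Performance")
      else if xs.any (fun w => w == "merger" || w == "acquisition" || w == "deal") then
        some ((1 : Int), "Mergers and Acquisitions")
      else if xs.any (fun w => w == "ceo" || w == "management" || w == "leadership") then
        some ((2 : Int), "Corporate Leadership and Management")
      else if xs.any (fun w => w == "regulatory" || w == "sec" || w == "compliance") then
        some ((3 : Int), "Regulatory and Compliance")
      else if xs.any (fun w => w == "technology" || w == "innovation" || w == "digital") then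
        some ((4 : Int), "Technology and Innovation")
      else none := by
  induction xs with
  | nil => rfl
  | cons w ws ih =>
    by_cases h0 : w = "earnings" ∨ w = "revenue" ∨ w = "profit"
    · have hks : pvKeywordIndex.get? w = some (0, "Earnings and Financial Performance") := by
        rcases h0 with h | h | h <;> subst h <;> rfl
      have hw : (w == "earnings" || w == "revenue" || w == "profit") = true := by
        rcases h0 with h | h | h <;> subst h <;> rfl
      simp only [pvBestHit, hks, ih, List.any_cons, hw, Bool.true_or, if_true]
      split_ifs <;> norm_num
    by_cases h1 : w = "merger" ∨ w = "acquisition" ∨ w = "deal"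
    · have hks : pvKeywordIndex.get? w = some (1, "Mergers and Acquisitions") := by
        rcases h1 with h | h | h <;> subst h <;> rfl
      have hw : (w == "merger" || w == "acquisition" || w == "deal") = true := by
        rcases h1 with h | h | h <;> subst h <;> rfl
      push Not at h0
      have hw0 : (w == "earnings" || w == "revenue" || w == "profit") = false := by
        simp [h0.1, h0.2.1, h0.2.2]
      simp only [pvBestHit, hks, ih, List.any_cons, hw0, hw, Bool.false_or, Bool.true_or, if_true]
      split_ifs <;> norm_num
    by_cases h2 : w = "ceo" ∨ w = "management" ∨ w = "leadership"
    · have hks : pvKeywordIndex.get? w = some (2, "Corporate Leadership and Management") := by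
        rcases h2 with h | h | h <;> subst h <;> rfl
      have hw : (w == "ceo" || w == "management" || w == "leadership") = true := by
        rcases h2 with h | h | h <;> subst h <;> rfl
      push Not at h0 h1
      have hw0 : (w == "earnings" || w == "revenue" || w == "profit") = false := by
        simp [h0.1, h0.2.1, h0.2.2]
      have hw1 : (w == "merger" || w == "acquisition" || w == "deal") = false := by
        simp [h1.1, h1.2.1, h1.2.2]
      simp only [pvBestHit, hks, ih, List.any_cons, hw0, hw1, hw, Bool.false_or, Bool.true_or, if_true]
      split_ifs <;> norm_num
    by_cases h3 : w = "regulatory" ∨ w = "sec" ∨ w = "compliance"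
    · have hks : pvKeywordIndex.get? w = some (3, "Regulatory and Compliance") := by
        rcases h3 with h | h | h <;> subst h <;> rfl
      have hw : (w == "regulatory" || w == "sec" || w == "compliance") = true := by
        rcases h3 with h | h | h <;> subst h <;> rfl
      push Not at h0 h1 h2
      have hw0 : (w == "earnings" || w == "revenue" || w == "profit") = false := by
        simp [h0.1, h0.2.1, h0.2.2]
      have hw1 : (w == "merger" || w == "acquisition" || w == "deal") = false := by
        simp [h1.1, h1.2.1, h1.2.2]
      have hw2 : (w == "ceo" || w == "management" || w == "leadership") = false := by
        simp [h2.1, h2.2.1, h2.2.2]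
      simp only [pvBestHit, hks, ih, List.any_cons, hw0, hw1, hw2, hw, Bool.false_or, Bool.true_or, if_true]
      split_ifs <;> norm_num
    by_cases h4 : w = "technology" ∨ w = "innovation" ∨ w = "digital"
    · have hks : pvKeywordIndex.get? w = some (4, "Technology and Innovation") := by
        rcases h4 with h | h | h <;> subst h <;> rfl
      have hw : (w == "technology" || w == "innovation" || w == "digital") = true := by
        rcases h4 with h | h | h <;> subst h <;> rfl
      push Not at h0 h1 h2 h3
      have hw0 : (w == "earnings" || w == "revenue" || w == "profit") = false := by
        simp [h0.1, h0.2.1, h0.2.2]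
      have hw1 : (w == "merger" || w == "acquisition" || w == "deal") = false := by
        simp [h1.1, h1.2.1, h1.2.2]
      have hw2 : (w == "ceo" || w == "management" || w == "leadership") = false := by
        simp [h2.1, h2.2.1, h2.2.2]
      have hw3 : (w == "regulatory" || w == "sec" || w == "compliance") = false := by
        simp [h3.1, h3.2.1, h3.2.2]
      simp only [pvBestHit, hks, ih, List.any_cons, hw0, hw1, hw2, hw3, hw, Bool.false_or, Bool.true_or, if_true]
      split_ifs <;> norm_num
    · push Not at h0 h1 h2 h3 h4
      have hk : pvKeywordIndex.get? w = none := by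
        have hd : pvKeywordIndex = ⟨[
          ("earnings", ((0 : Int), "Earnings and Financial Performance")),
          ("revenue", (0, "Earnings and Financial Performance")),
          ("profit", (0, "Earnings and Financial Performance")),
          ("merger", (1, "Mergers and Acquisitions")),
          ("acquisition", (1, "Mergers and Acquisitions")),
          ("deal", (1, "Mergers and Acquisitions")),
          ("ceo", (2, "Corporate Leadership and Management")),
          ("management", (2, "Corporate Leadership and Management")),
          ("leadership", (2, "Corporate Leadership and Management")),
          ("regulatory", (3, "Regulatory and Compliance")),
          ("sec", (3, "Regulatory and Compliance")),
          ("compliance", (3, "Regulatory and Compliance")),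
          ("technology", (4, "Technology and Innovation")),
          ("innovation", (4, "Technology and Innovation")),
          ("digital", (4, "Technology and Innovation"))]⟩ := by rfl
        simp [hd, PySem.Dict.get?, Ne.symm h0.1, Ne.symm h0.2.1, Ne.symm h0.2.2,
          Ne.symm h1.1, Ne.symm h1.2.1, Ne.symm h1.2.2,
          Ne.symm h2.1, Ne.symm h2.2.1, Ne.symm h2.2.2,
          Ne.symm h3.1, Ne.symm h3.2.1, Ne.symm h3.2.2,
          Ne.symm h4.1, Ne.symm h4.2.1, Ne.symm h4.2.2]
      have hw0 : (w == "earnings" || w == "revenue" || w == "profit") = false := by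
        simp [h0.1, h0.2.1, h0.2.2]
      have hw1 : (w == "merger" || w == "acquisition" || w == "deal") = false := by
        simp [h1.1, h1.2.1, h1.2.2]
      have hw2 : (w == "ceo" || w == "management" || w == "leadership") = false := by
        simp [h2.1, h2.2.1, h2.2.2]
      have hw3 : (w == "regulatory" || w == "sec" || w == "compliance") = false := by
        simp [h3.1, h3.2.1, h3.2.2]
      have hw4 : (w == "technology" || w == "innovation" || w == "digital") = false := by
        simp [h4.1, h4.2.1, h4.2.2]
      simp only [pvBestHit, hk, ih, List.any_cons, hw0, hw1, hw2, hw3, hw4, Bool.false_or]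

-- ===== VERDICT (by name: the statement is the Claim_ definition above) =====
theorem generate_topic_description_py_spec : Claim_equal_generate_topic_description_py := by
  intro keywords _
  unfold Spec_generate_topic_description_py generate_topic_description_py generate_topic_description_py_alt
  by_cases h : keywords = []
  · simp [h]
  · simp only [h, if_false]
    rw [pv_tri_any, pv_tri_any, pv_tri_any, pv_tri_any, pv_tri_any,
      pvBestHit_eq (PySem.List.slice keywords none (some 3))]
    split_ifs <;> rfl
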